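-- pv_equiv track=rewrite | github.com/hyh1016/programmers-with-python | python/level2/행렬의 곱셈.py | solution
-- ===== SOURCE A (Python) =====
-- def solution(arr1, arr2):
--     answer = []
--     for i in range(0, len(arr1)):
--         row = []
--         for j in range(0, len(arr2[0])):
--             element = 0
--             for k in range(0, len(arr1[0])):
--                 element += arr1[i][k]*arr2[k][j]
--             row.append(element)
--         answer.append(row)
--     return answer
-- ===== SOURCE B (Python) =====
-- def solution(arr1, arr2):
--     out = []
--     for row in arr1:
--         acc = [0] * len(arr2[0])
--         for a, brow in zip(row, arr2):
--             acc = [s + a * b for s, b in zip(acc, brow)]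
--         out.append(acc)
--     return out
-- ===== Notes on version B (the rewrite author's own statement) =====
-- stated objective: alternative
-- what changed: Instead of computing each output cell as a dot product with a triple index loop, B builds each output row as a running vector accumulator: it starts from a zero row and adds a*arr2[k] (a scaled row of arr2) for each entry a of the arr1 row, i.e. the linear-combination-of-rows (axpy) formulation with the two inner loops' summation order swapped and no index arithmetic.
-- outside the precondition, e.g. on solution([[1], [2, 3]], [[5], [7]]): A returns [[5], [10]], B returns [[5], [31]]; on solution([[1, 2]], [[3, 4]]): A raises IndexError, B returns [[3, 4]]
import Mathlib
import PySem

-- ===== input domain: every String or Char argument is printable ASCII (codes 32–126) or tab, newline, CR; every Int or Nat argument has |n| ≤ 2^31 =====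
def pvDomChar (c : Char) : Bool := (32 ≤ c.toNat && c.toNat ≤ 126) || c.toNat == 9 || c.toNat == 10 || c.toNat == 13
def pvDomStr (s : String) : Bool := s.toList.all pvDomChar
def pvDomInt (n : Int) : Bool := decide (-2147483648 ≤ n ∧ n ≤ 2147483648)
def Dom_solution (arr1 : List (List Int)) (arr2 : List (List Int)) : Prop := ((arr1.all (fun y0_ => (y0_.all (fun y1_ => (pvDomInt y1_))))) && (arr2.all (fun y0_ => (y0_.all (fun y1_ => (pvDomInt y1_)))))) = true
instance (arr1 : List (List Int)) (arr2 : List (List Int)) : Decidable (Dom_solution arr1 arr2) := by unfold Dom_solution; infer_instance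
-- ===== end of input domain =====

-- B replaces A's per-cell dot products by the linear-combination-of-rows (axpy) formulation:
-- each output row is a zero vector into which a*arr2[k] is accumulated for each entry a of the
-- arr1 row — the summation order is swapped and there is no index arithmetic; same asymptotic cost.

-- ===== PORT A =====
def solution (arr1 : List (List Int)) (arr2 : List (List Int)) : List (List Int) :=
  (PySem.List.pyRange 0 (arr1.length : Int) 1).foldl (fun answer i =>
    answer ++ [((PySem.List.pyRange 0 ((PySem.List.pyGetD arr2 0 []).length : Int) 1).foldl (fun row j =>
      row ++ [((PySem.List.pyRange 0 ((PySem.List.pyGetD arr1 0 []).length : Int) 1).foldl (fun element k =>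
        element + PySem.List.pyGetD (PySem.List.pyGetD arr1 i []) k 0 *
                  PySem.List.pyGetD (PySem.List.pyGetD arr2 k []) j 0) 0)]) [])]) []

-- ===== PORT B =====
-- 'for row in arr1: acc = [0]*len(arr2[0]); for a, brow in zip(row, arr2): acc = [s + a*b ...]; out.append(acc)'
def solution_alt (arr1 : List (List Int)) (arr2 : List (List Int)) : List (List Int) :=
  arr1.foldl (fun out row =>
    out ++ [(List.zip row arr2).foldl
      (fun acc q => (List.zip acc q.2).map (fun r => r.1 + q.1 * r.2))
      (List.replicate (PySem.List.pyGetD arr2 0 []).length 0)]) []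

-- ===== PRECONDITION & SPEC =====
-- Pre_ is shape-compatibility of the product: either arr1 is empty (both return []), or arr2 is
-- nonempty, every row of arr1 supplies exactly the n = len(arr1[0]) factors A reads (its length,
-- truncated at len(arr2), equals n), and each of the n used rows of arr2 has at least len(arr2[0])
-- entries.  Outside it A either raises (empty arr2, too-short rows) or, on ragged arr1 rows longer
-- than arr1[0], returns a value that silently ignores their extra entries while B consumes them;
-- see the claim's cites.
def Pre_solution (arr1 : List (List Int)) (arr2 : List (List Int)) : Prop :=
  arr1 = [] ∨ (arr2 ≠ [] ∧
    (∀ r ∈ arr1, min r.length arr2.length = (arr1.getD 0 []).length) ∧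
    (∀ r ∈ arr2.take (arr1.getD 0 []).length, (arr2.getD 0 []).length ≤ r.length))
instance (arr1 : List (List Int)) (arr2 : List (List Int)) : Decidable (Pre_solution arr1 arr2) := by
  unfold Pre_solution; infer_instance

def pvWitness_solution : List (List Int) × List (List Int) := ([[1, 2], [3, 4]], [[5, 6], [7, 8]])

def Spec_solution (arr1 : List (List Int)) (arr2 : List (List Int)) (out : List (List Int)) : Prop := out = solution_alt arr1 arr2
instance (arr1 : List (List Int)) (arr2 : List (List Int)) (out : List (List Int)) : Decidable (Spec_solution arr1 arr2 out) := by unfold Spec_solution; infer_instance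

-- ===== CLAIM (what is proved, stated in full; the proofs are below) =====
def Claim_equal_solution : Prop := ∀ (arr1 : List (List Int)) (arr2 : List (List Int)), Dom_solution arr1 arr2 → Pre_solution arr1 arr2 → Spec_solution arr1 arr2 (solution arr1 arr2)

-- ===== LEMMAS AND PROOFS =====

-- A's three appending loops are three nested maps of sums over ranges (its normal form).
theorem solution_eq_nf (arr1 arr2 : List (List Int)) :
    solution arr1 arr2 = (List.range arr1.length).map (fun i =>
      (List.range (arr2.getD 0 []).length).map (fun j =>
        ((List.range (arr1.getD 0 []).length).map (fun k =>
          (arr1.getD i []).getD k 0 * (arr2.getD k []).getD j 0)).sum)) := by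
  simp only [solution, PySem.List.foldl_append_singleton_eq_map, PySem.List.foldl_add,
    PySem.List.pyRange_zero_nat, List.map_map, Function.comp_def, PySem.List.pyGetD_natCast,
    List.nil_append, zero_add, PySem.List.pyGetD_zero]

-- mapping a list is mapping its indices
theorem map_getD_range {α β : Type} (l : List α) (d : α) (F : α → β) :
    (List.range l.length).map (fun i => F (l.getD i d)) = l.map F := by
  induction l with
  | nil => simp
  | cons x xs ih =>
    simp only [List.length_cons, List.range_succ_eq_map, List.map_cons, List.map_map]
    simpa using ih

-- one axpy step, entrywise
theorem zipmap_getD (acc brow : List Int) (a : Int) (j : Nat)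
    (hj : j < acc.length) (hj2 : j < brow.length) :
    ((List.zip acc brow).map (fun r => r.1 + a * r.2)).getD j 0
      = acc.getD j 0 + a * brow.getD j 0 := by
  have hz : j < (List.zip acc brow).length := by simp [List.length_zip]; omega
  rw [List.getD_eq_getElem?_getD, List.getElem?_map, List.getElem?_eq_getElem hz]
  rw [List.getD_eq_getElem?_getD (l := acc), List.getElem?_eq_getElem hj]
  rw [List.getD_eq_getElem?_getD (l := brow), List.getElem?_eq_getElem hj2]
  simp [List.getElem_zip]

-- loop invariant of B's accumulator: folding axpy steps over (coefficient, row) pairs, starting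
-- from an accumulator of width p, yields entrywise sums
theorem foldl_axpy (p : Nat) (ps : List (Int × List Int)) (acc : List Int)
    (hacc : acc.length = p) (hb : ∀ q ∈ ps, p ≤ q.2.length) :
    ps.foldl (fun acc q => (List.zip acc q.2).map (fun r => r.1 + q.1 * r.2)) acc
      = (List.range p).map (fun j => acc.getD j 0 + (ps.map (fun q => q.1 * q.2.getD j 0)).sum) := by
  induction ps generalizing acc with
  | nil =>
    simp only [List.foldl_nil, List.map_nil, List.sum_nil, add_zero]
    subst hacc
    have := map_getD_range acc 0 id
    simpa using this.symm
  | cons q ps ih =>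
    have hq : p ≤ q.2.length := hb q (by simp)
    have hlen : ((List.zip acc q.2).map (fun r => r.1 + q.1 * r.2)).length = p := by
      simp [List.length_zip]; omega
    rw [List.foldl_cons, ih _ hlen (fun r hr => hb r (by simp [hr]))]
    apply List.map_congr_left
    intro j hj
    have hj' : j < p := List.mem_range.mp hj
    rw [zipmap_getD acc q.2 q.1 j (by omega) (by omega)]
    simp [add_assoc]

-- B reaches the same normal form as A on well-formed inputs
theorem solution_alt_eq_nf (arr1 arr2 : List (List Int))
    (hr1 : ∀ r ∈ arr1, min r.length arr2.length = (arr1.getD 0 []).length)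
    (hr2 : ∀ r ∈ arr2.take (arr1.getD 0 []).length, (arr2.getD 0 []).length ≤ r.length) :
    solution_alt arr1 arr2 = (List.range arr1.length).map (fun i =>
      (List.range (arr2.getD 0 []).length).map (fun j =>
        ((List.range (arr1.getD 0 []).length).map (fun k =>
          (arr1.getD i []).getD k 0 * (arr2.getD k []).getD j 0)).sum)) := by
  unfold solution_alt
  rw [PySem.List.foldl_append_singleton_eq_map, List.nil_append]
  rw [show (List.range arr1.length).map (fun i =>
      (List.range (arr2.getD 0 []).length).map (fun j =>
        ((List.range (arr1.getD 0 []).length).map (fun k =>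
          (arr1.getD i []).getD k 0 * (arr2.getD k []).getD j 0)).sum))
    = arr1.map (fun row => (List.range (arr2.getD 0 []).length).map (fun j =>
        ((List.range (arr1.getD 0 []).length).map (fun k =>
          row.getD k 0 * (arr2.getD k []).getD j 0)).sum))
    from map_getD_range arr1 [] (fun row => (List.range (arr2.getD 0 []).length).map (fun j =>
        ((List.range (arr1.getD 0 []).length).map (fun k =>
          row.getD k 0 * (arr2.getD k []).getD j 0)).sum))]
  apply List.map_congr_left
  intro r hrm
  set n := (arr1.getD 0 []).length with hn
  set p := (arr2.getD 0 []).length with hp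
  have hmin : min r.length arr2.length = n := hr1 r hrm
  have hzlen : (List.zip r arr2).length = n := by simp [List.length_zip, hmin]
  have hb : ∀ q ∈ List.zip r arr2, p ≤ q.2.length := by
    intro q hq
    obtain ⟨k, hk, rfl⟩ := List.mem_iff_getElem.mp hq
    have hk' : k < n := by omega
    have hka : k < arr2.length := by omega
    have : arr2[k] ∈ arr2.take n := by
      have : (arr2.take n)[k]'(by simp; omega) = arr2[k] := List.getElem_take
      rw [← this]; exact List.getElem_mem _
    have := hr2 _ this
    simpa [List.getElem_zip] using this
  rw [foldl_axpy p (List.zip r arr2) _ (by simp [PySem.List.pyGetD_zero, hp]) hb]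
  apply List.map_congr_left
  intro j hj
  have hj' : j < p := List.mem_range.mp hj
  have hacc0 : (List.replicate (PySem.List.pyGetD arr2 0 []).length (0 : Int)).getD j 0 = 0 := by
    simp only [List.getD_eq_getElem?_getD, List.getElem?_replicate]
    split <;> rfl
  rw [hacc0, zero_add]
  congr 1
  rw [← map_getD_range (List.zip r arr2) (0, []) (fun q => q.1 * q.2.getD j 0), hzlen]
  apply List.map_congr_left
  intro k hk
  have hk' : k < n := List.mem_range.mp hk
  have hkr : k < r.length := by omega
  have hka : k < arr2.length := by omega
  have hkz : k < (List.zip r arr2).length := by omega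
  rw [List.getD_eq_getElem?_getD, List.getElem?_eq_getElem hkz]
  rw [List.getD_eq_getElem?_getD (l := r), List.getElem?_eq_getElem hkr]
  rw [List.getD_eq_getElem?_getD (l := arr2), List.getElem?_eq_getElem hka]
  simp [List.getElem_zip]

-- ===== VERDICT (by name: the statement is the Claim_ definition above) =====
theorem solution_spec : Claim_equal_solution := by
  intro arr1 arr2 _hdom hpre
  unfold Spec_solution
  rcases hpre with h1 | ⟨_h2, hr1, hr2⟩
  · subst h1
    rw [solution_eq_nf]
    simp [solution_alt]
  · rw [solution_eq_nf, solution_alt_eq_nf arr1 arr2 hr1 hr2]
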